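-- pv_equiv track=rewrite | github.com/s29602-pj/MetaheurstykaNonogram | funkcjaCelu.py | generuj_sasiedztwo
-- ===== SOURCE A (Python) =====
-- import copy
--
-- def generuj_sasiedztwo(siatka):
--     wysokosc = len(siatka)
--     szerokosc = len(siatka[0])
--     sasiedzi = []
--
--     for y in range(wysokosc):
--         for x in range(szerokosc):
--             if siatka[y][x] == 1 or siatka[y][x] == 2:
--                 nowa = copy.deepcopy(siatka)
--                 if nowa[y][x] == 1:
--                     nowa[y][x] = 2
--                 elif nowa[y][x] == 2:
--                     nowa[y][x] = 1
--                 sasiedzi.append(nowa)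
--
--     return sasiedzi
-- ===== SOURCE B (Python) =====
-- def generuj_sasiedztwo(siatka):
--     szerokosc = len(siatka[0])
--
--     def warianty(wiersz, n):
--         # every version of wiersz with exactly ONE of its first n cells flipped
--         # (1 <-> 2), built by structural recursion: flip the head, or keep the
--         # head and flip somewhere in the tail
--         if n == 0 or not wiersz:
--             return []
--         v, ogon = wiersz[0], wiersz[1:]
--         pierwsze = [[3 - v] + ogon] if v in (1, 2) else []
--         return pierwsze + [[v] + w for w in warianty(ogon, n - 1)]
--
--     def sasiedzi(wiersze):
--         # flip in the first row (tail shared by value), or keep the first row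
--         # and flip in the remaining rows
--         if not wiersze:
--             return []
--         glowa, ogon = wiersze[0], wiersze[1:]
--         return [[w] + ogon for w in warianty(glowa, szerokosc)] \
--              + [[glowa] + s for s in sasiedzi(ogon)]
--
--     return sasiedzi(siatka)
-- ===== Notes on version B (the rewrite author's own statement) =====
-- stated objective: alternative
-- what changed: Replaces the index-driven double scan that deep-copies the whole grid per flip by a structural recursion: a recursive row-variant generator produces each row with one cell flipped (head-flip vs tail-recursion), and a recursive grid function prepends the untouched prefix/suffix rows, so no indices and no full-grid copies are used.
-- outside the precondition, e.g. on generuj_sasiedztwo([]): A raises IndexError, B raises IndexError; on generuj_sasiedztwo([[1, 2], [1]]): A raises IndexError, B returns [[[2, 2], [1]], [[1, 1], [1]], [[1, 2], [2]]]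
import Mathlib
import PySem

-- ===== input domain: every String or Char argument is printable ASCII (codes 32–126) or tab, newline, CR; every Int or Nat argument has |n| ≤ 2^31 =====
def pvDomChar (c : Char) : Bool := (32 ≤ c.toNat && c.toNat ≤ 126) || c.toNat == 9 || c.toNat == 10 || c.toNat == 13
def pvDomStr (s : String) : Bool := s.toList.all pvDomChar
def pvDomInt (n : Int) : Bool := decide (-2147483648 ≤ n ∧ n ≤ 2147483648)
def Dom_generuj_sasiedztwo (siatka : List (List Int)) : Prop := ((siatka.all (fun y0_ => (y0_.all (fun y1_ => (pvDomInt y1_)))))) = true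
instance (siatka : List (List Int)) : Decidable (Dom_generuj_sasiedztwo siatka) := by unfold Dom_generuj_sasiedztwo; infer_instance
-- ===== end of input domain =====

-- B: structural recursion instead of index scans — a recursive row-variant generator
-- (flip head vs recurse on tail) and a recursive grid function prepending untouched rows
-- (objective: alternative; return value only).


-- ===== PORT A =====
def generuj_sasiedztwo (siatka : List (List Int)) : List (List (List Int)) :=
  let wysokosc := siatka.length
  let szerokosc := (siatka.headD []).length
  (List.range wysokosc).foldl (fun sasiedzi y =>
    (List.range szerokosc).foldl (fun sasiedzi x =>
      if (siatka.getD y []).getD x 0 = 1 ∨ (siatka.getD y []).getD x 0 = 2 then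
        let nowa := siatka   -- deepcopy: value copy
        let nowa :=
          if (nowa.getD y []).getD x 0 = 1 then nowa.modify y (fun r => r.set x 2)
          else if (nowa.getD y []).getD x 0 = 2 then nowa.modify y (fun r => r.set x 1)
          else nowa
        sasiedzi ++ [nowa]
      else sasiedzi) sasiedzi) []

-- ===== PORT B =====
-- every version of wiersz with exactly one of its first n cells flipped (1 <-> 2)
def pvWarianty (wiersz : List Int) (n : Nat) : List (List Int) :=
  match n, wiersz with
  | 0, _ => []
  | _, [] => []
  | n + 1, v :: ogon =>
      (if v = 1 ∨ v = 2 then [(3 - v) :: ogon] else []) ++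
      (pvWarianty ogon n).map (fun w => v :: w)

-- flip in the first row, or keep it and flip in the remaining rows
def pvSasiedzi (szerokosc : Nat) : List (List Int) → List (List (List Int))
  | [] => []
  | glowa :: ogon =>
      (pvWarianty glowa szerokosc).map (fun w => w :: ogon) ++
      (pvSasiedzi szerokosc ogon).map (fun s => glowa :: s)

def generuj_sasiedztwo_alt (siatka : List (List Int)) : List (List (List Int)) :=
  let szerokosc := (siatka.headD []).length
  pvSasiedzi szerokosc siatka

-- ===== PRECONDITION & SPEC =====
-- Pre_ excludes exactly the inputs where Python A raises IndexError: the empty grid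
-- (siatka[0]) and grids with a row shorter than the first row (siatka[y][x]).
def Pre_generuj_sasiedztwo (siatka : List (List Int)) : Prop :=
  siatka ≠ [] ∧ ∀ r ∈ siatka, (siatka.headD []).length ≤ r.length
instance (siatka : List (List Int)) : Decidable (Pre_generuj_sasiedztwo siatka) := by
  unfold Pre_generuj_sasiedztwo; infer_instance
def pvWitness_generuj_sasiedztwo : List (List Int) := [[1, 0], [2, 1]]

def Spec_generuj_sasiedztwo (siatka : List (List Int)) (out : List (List (List Int))) : Prop := out = generuj_sasiedztwo_alt siatka
instance (siatka : List (List Int)) (out : List (List (List Int))) : Decidable (Spec_generuj_sasiedztwo siatka out) := by unfold Spec_generuj_sasiedztwo; infer_instance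

-- ===== CLAIM (what is proved, stated in full; the proofs are below) =====
def Claim_equal_generuj_sasiedztwo : Prop := ∀ (siatka : List (List Int)), Dom_generuj_sasiedztwo siatka → Pre_generuj_sasiedztwo siatka → Spec_generuj_sasiedztwo siatka (generuj_sasiedztwo siatka)

-- ===== LEMMAS AND PROOFS =====

-- canonical form of both ports: one neighbor per 1/2 cell, in row-major order
def pvCanon (szerokosc : Nat) (siatka : List (List Int)) : List (List (List Int)) :=
  (List.range siatka.length).flatMap (fun y =>
    (List.range szerokosc).filterMap (fun x =>
      if (siatka.getD y []).getD x 0 = 1 ∨ (siatka.getD y []).getD x 0 = 2 then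
        some (siatka.modify y (fun r => r.modify x (fun v => 3 - v)))
      else none))

-- setting a cell holding 1 to 2 (resp. 2 to 1) is the closed-form flip 3 - v
theorem pv_set_eq_modify_flip (r : List Int) (x : Nat) (v : Int)
    (h : r.getD x 0 = v) :
    r.set x (3 - v) = r.modify x (fun w => 3 - w) := by
  induction r generalizing x with
  | nil => simp
  | cons a t ih =>
    cases x with
    | zero => simp_all
    | succ n =>
      simp only [List.getD_cons_succ] at h
      simp [List.modify, ih n h]

-- modify with functions that agree on the row being modified
theorem pv_modify_congr {a : Type} [Inhabited a] (l : List a) (y : Nat) (f g : a -> a)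
    (h : f (l.getD y default) = g (l.getD y default)) : l.modify y f = l.modify y g := by
  induction l generalizing y with
  | nil => simp
  | cons b t ih =>
    cases y with
    | zero => simp_all [List.modify_cons]
    | succ n =>
      simp only [List.getD_cons_succ] at h
      simp [ih n h]

-- filterMap with an if-some-none body is filter-then-map
theorem pv_filterMap_if {α β : Type} (p : α → Prop) [DecidablePred p] (g : α → β)
    (l : List α) :
    l.filterMap (fun x => if p x then some (g x) else none)
      = (l.filter (fun x => decide (p x))).map g := by
  induction l with
  | nil => rfl
  | cons a t ih =>
    by_cases hp : p a <;> simp [hp, ih]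

-- port A equals the canonical form (unconditionally, as Lean functions)
theorem pv_A_eq_canon (siatka : List (List Int)) :
    generuj_sasiedztwo siatka = pvCanon (siatka.headD []).length siatka := by
  unfold generuj_sasiedztwo pvCanon
  rw [PySem.List.foldl_congr_mem _ _
    (fun sasiedzi y => sasiedzi ++
      ((List.range (siatka.headD []).length).filter (fun x =>
        decide ((siatka.getD y []).getD x 0 = 1 ∨ (siatka.getD y []).getD x 0 = 2))).map
        (fun x =>
          if (siatka.getD y []).getD x 0 = 1 then siatka.modify y (fun r => r.set x 2)
          else if (siatka.getD y []).getD x 0 = 2 then siatka.modify y (fun r => r.set x 1)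
          else siatka)) _
    (fun acc y _ => PySem.List.foldl_append_ite _ _ _ _)]
  rw [PySem.List.foldl_append_eq_flatMap, List.nil_append]
  refine List.flatMap_congr (fun y _ => ?_)
  rw [pv_filterMap_if (fun x => (siatka.getD y []).getD x 0 = 1 ∨ (siatka.getD y []).getD x 0 = 2)
      (fun x => siatka.modify y (fun r => r.modify x (fun v => 3 - v)))]
  refine (List.map_congr_left (fun x hx => ?_)).symm
  have hp := (List.mem_filter.mp hx).2
  simp only [decide_eq_true_eq] at hp
  rcases hp with h1 | h2
  · rw [if_pos h1]
    refine (pv_modify_congr siatka y _ _ ?_).symm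
    have hset := pv_set_eq_modify_flip (siatka.getD y []) x 1 h1
    norm_num at hset
    simpa using hset
  · by_cases h1 : (siatka.getD y []).getD x 0 = 1
    · rw [h1] at h2; norm_num at h2
    · rw [if_neg h1, if_pos h2]
      refine (pv_modify_congr siatka y _ _ ?_).symm
      have hset := pv_set_eq_modify_flip (siatka.getD y []) x 2 h2
      norm_num at hset
      simpa using hset

-- the row-variant generator equals the per-cell filterMap over the index range
theorem pv_warianty_eq (wiersz : List Int) (n : Nat) :
    pvWarianty wiersz n
      = (List.range n).filterMap (fun x =>
          if wiersz.getD x 0 = 1 ∨ wiersz.getD x 0 = 2 then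
            some (wiersz.modify x (fun v => 3 - v))
          else none) := by
  induction n generalizing wiersz with
  | zero => cases wiersz <;> rfl
  | succ n ih =>
    cases wiersz with
    | nil => simp [pvWarianty]
    | cons v ogon =>
      rw [List.range_succ_eq_map, List.filterMap_cons, List.filterMap_map]
      by_cases hv : v = 1 ∨ v = 2
      · simp only [pvWarianty, if_pos hv, List.getD_cons_zero, List.modify_cons, ih ogon,
          List.map_filterMap, Function.comp]
        simp [apply_ite]
      · simp only [pvWarianty, if_neg hv, List.getD_cons_zero, List.modify_cons, ih ogon,
          List.map_filterMap, Function.comp, List.nil_append]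
        simp [apply_ite]

-- the recursive grid generator equals the canonical form
theorem pv_sasiedzi_eq_canon (szer : Nat) (siatka : List (List Int)) :
    pvSasiedzi szer siatka = pvCanon szer siatka := by
  induction siatka with
  | nil => rfl
  | cons glowa ogon ih =>
    unfold pvSasiedzi pvCanon
    simp only [List.length_cons]
    rw [List.range_succ_eq_map, List.flatMap_cons, List.flatMap_map]
    congr 1
    · rw [pv_warianty_eq]
      simp only [List.getD_cons_zero, List.map_filterMap]
      refine List.filterMap_congr (fun x _ => ?_)
      split_ifs with h
      · simp
      · rfl
    · rw [ih]
      unfold pvCanon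
      rw [List.map_flatMap]
      refine List.flatMap_congr (fun y _ => ?_)
      rw [List.map_filterMap]
      refine List.filterMap_congr (fun x _ => ?_)
      simp only [List.getD_cons_succ]
      split_ifs with h
      · simp
      · rfl

-- ===== VERDICT (by name: the statement is the Claim_ definition above) =====
theorem generuj_sasiedztwo_spec : Claim_equal_generuj_sasiedztwo := by
  intro siatka _ _
  unfold Spec_generuj_sasiedztwo generuj_sasiedztwo_alt
  rw [pv_A_eq_canon, pv_sasiedzi_eq_canon]
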